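-- pv_equiv track=rewrite | github.com/SydneyCardew/Pastel_Tetris | functions.py | get_height_of_columns
-- ===== SOURCE A (Python) =====
-- def get_height_of_columns(dead_table, rows, columns):
--     """gets the height of the columns for the instant drop function"""
--     rotated_table = list(zip(*dead_table[::-1]))
--     column_heights = {x: 0 for x in range(columns)}
--     for column_index, column in enumerate(rotated_table):
--         if sum(column) == 0:
--             column_heights[column_index] = 0
--         else:
--             for row_index, cell in enumerate(column):
--                 if cell > 0:
--                     column_heights[column_index] = row_index + 1
--     return column_heights
-- ===== SOURCE B (Python) =====
-- def get_height_of_columns(dead_table, rows, columns):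
--     """gets the height of the columns for the instant drop function"""
--     column_heights = {x: 0 for x in range(columns)}
--     n = len(dead_table)
--     width = min((len(row) for row in dead_table), default=0)
--     # one row-major streaming pass: per-column running sum and first filled row
--     col_sum = [0] * width
--     top_row = [None] * width
--     for r, row in enumerate(dead_table):
--         col_sum = [s + v for s, v in zip(col_sum, row)]
--         top_row = [t if t is not None else (r if v > 0 else None)
--                    for t, v in zip(top_row, row)]
--     for c in range(width):
--         if col_sum[c] == 0:
--             column_heights[c] = 0
--         elif top_row[c] is not None:
--             column_heights[c] = n - top_row[c]
--     return column_heights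
-- ===== Notes on version B (the rewrite author's own statement) =====
-- stated objective: alternative
-- what changed: Replaces A's zip(*dead_table[::-1]) transpose followed by a full bottom-up scan of each column with a single row-major streaming pass over the board that maintains per-column running-sum and first-filled-row accumulator vectors (zip comprehensions), from which the heights are read off at the end.
import Mathlib
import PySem

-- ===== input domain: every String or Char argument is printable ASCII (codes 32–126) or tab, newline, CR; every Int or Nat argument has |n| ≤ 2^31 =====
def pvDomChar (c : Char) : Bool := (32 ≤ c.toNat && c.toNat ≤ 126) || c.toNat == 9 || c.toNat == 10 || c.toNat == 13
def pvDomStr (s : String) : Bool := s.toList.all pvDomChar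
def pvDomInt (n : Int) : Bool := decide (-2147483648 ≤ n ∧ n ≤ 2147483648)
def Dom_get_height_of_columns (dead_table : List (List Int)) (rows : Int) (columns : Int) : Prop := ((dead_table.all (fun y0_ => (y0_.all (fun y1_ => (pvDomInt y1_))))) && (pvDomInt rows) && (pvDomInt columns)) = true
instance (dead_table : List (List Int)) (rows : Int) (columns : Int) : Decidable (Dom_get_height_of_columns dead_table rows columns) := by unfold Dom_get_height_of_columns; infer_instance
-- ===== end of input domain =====

-- B replaces A's transpose + per-column scans by one row-major streaming pass that
-- maintains per-column running-sum and first-filled-row accumulators; same results, no speed claim.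

-- ===== PORT A =====
-- helper implementing Python's zip(*ls): columns until the shortest row is exhausted
def pvZipCols : List Int → List (List Int) → List (List Int)
  | [], _ => []
  | x :: xs, rest =>
    if rest.any (·.isEmpty) then []
    else (x :: rest.map (fun r => r.headD 0)) :: pvZipCols xs (rest.map (·.tail))

def pvZipStar (ls : List (List Int)) : List (List Int) :=
  match ls with
  | [] => []
  | l :: rest => pvZipCols l rest

def get_height_of_columns (dead_table : List (List Int)) (rows : Int) (columns : Int) : List (Int × Int) :=
  let rotated_table := pvZipStar dead_table.reverse
  let column_heights : PySem.Dict Int Int :=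
    (PySem.List.pyRange 0 columns 1).foldl (fun d x => d.insert x 0) PySem.Dict.empty
  let final := (PySem.List.enumerate rotated_table 0).foldl (fun d p =>
      if p.2.sum == 0 then d.insert p.1 0
      else (PySem.List.enumerate p.2 0).foldl
            (fun d q => if q.2 > 0 then d.insert p.1 (q.1 + 1) else d) d) column_heights
  final.items

-- ===== PORT B =====
def get_height_of_columns_alt (dead_table : List (List Int)) (rows : Int) (columns : Int) : List (Int × Int) :=
  let column_heights : PySem.Dict Int Int :=
    (PySem.List.pyRange 0 columns 1).foldl (fun d x => d.insert x 0) PySem.Dict.empty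
  let n : Int := dead_table.length
  -- min((len(row) for row in dead_table), default=0): builtin min as a fold
  let width : Int :=
    match dead_table with
    | [] => 0
    | r0 :: rest => rest.foldl (fun a r => min a (r.length : Int)) (r0.length : Int)
  -- [0]*width / [None]*width: width ≥ 0 here, so replicate width.toNat is exact;
  -- each 'zip(col_sum/top_row, row)' comprehension is a List.zipWith (zip truncates alike)
  let st :=
    (PySem.List.enumerate dead_table 0).foldl
      (fun (st : List Int × List (Option Int)) p =>
        (List.zipWith (fun s v => s + v) st.1 p.2,
         List.zipWith (fun t (v : Int) =>
            match t with
            | some _ => t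
            | none => if v > 0 then some p.1 else none) st.2 p.2))
      (List.replicate width.toNat (0 : Int), List.replicate width.toNat (none : Option Int))
  -- col_sum[c] / top_row[c] with c ∈ range(width) is always in range: pyGet? … |>.getD is exact
  let final := (PySem.List.pyRange 0 width 1).foldl (fun d c =>
      if (PySem.List.pyGet? st.1 c).getD 0 == 0 then d.insert c 0
      else match (PySem.List.pyGet? st.2 c).getD none with
           | some r => d.insert c (n - r)
           | none => d) column_heights
  final.items

-- ===== PRECONDITION & SPEC =====
def Spec_get_height_of_columns (dead_table : List (List Int)) (rows : Int) (columns : Int) (out : List (Int × Int)) : Prop := out = get_height_of_columns_alt dead_table rows columns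
instance (dead_table : List (List Int)) (rows : Int) (columns : Int) (out : List (Int × Int)) : Decidable (Spec_get_height_of_columns dead_table rows columns out) := by unfold Spec_get_height_of_columns; infer_instance

-- ===== CLAIM (what is proved, stated in full; the proofs are below) =====
def Claim_equal_get_height_of_columns : Prop := ∀ (dead_table : List (List Int)) (rows : Int) (columns : Int), Dom_get_height_of_columns dead_table rows columns → Spec_get_height_of_columns dead_table rows columns (get_height_of_columns dead_table rows columns)

-- ===== LEMMAS AND PROOFS =====

-- overwriting the same key twice keeps only the second value
theorem pv_insert_insert (d : PySem.Dict Int Int) (k v w : Int) :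
    (d.insert k v).insert k w = d.insert k w := by
  apply PySem.Dict.ext
  rw [PySem.Dict.items_insert, PySem.Dict.items_insert, PySem.Dict.items_insert]
  by_cases h : d.contains k = true
  · simp only [h, PySem.Dict.contains_insert_self, if_true, List.map_map]
    refine List.map_congr_left (fun p _ => ?_)
    by_cases hp : p.1 = k <;> simp [hp]
  · have h' : d.contains k = false := by simpa using h
    simp only [h', PySem.Dict.contains_insert_self, if_true, Bool.false_eq_true, if_false,
      List.map_append, List.map_cons, List.map_nil, beq_self_eq_true,
      List.append_cancel_right_eq]
    refine (List.map_congr_left (fun p hp => ?_)).trans (List.map_id _)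
    have hne : p.1 ≠ k := by
      intro he
      have hk : k ∈ d.keys := by
        have := PySem.Dict.mem_keys_of_mem_items (d := d) (p := p) hp
        simpa [he] using this
      have := (PySem.Dict.contains_iff_mem_keys (d := d) (k := k)).2 hk
      simp [h'] at this
    simp [hne]

-- last index (from 0) holding a positive cell
def pvLastPos : List Int → Option Nat
  | [] => none
  | x :: xs =>
    match pvLastPos xs with
    | some j => some (j + 1)
    | none => if x > 0 then some 0 else none

-- A's inner loop: every positive cell overwrites, so only the last one survives
theorem pv_inner_fold (col : List Int) : ∀ (s : Int) (d : PySem.Dict Int Int) (k : Int),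
    (PySem.List.enumerate col s).foldl
        (fun d q => if q.2 > 0 then d.insert k (q.1 + 1) else d) d =
      match pvLastPos col with
      | none => d
      | some j => d.insert k (s + j + 1) := by
  induction col with
  | nil => intro s d k; simp [PySem.List.enumerate, pvLastPos]
  | cons x xs ih =>
    intro s d k
    rw [PySem.List.enumerate_cons, List.foldl_cons, ih]
    cases hxs : pvLastPos xs with
    | none =>
      by_cases hx : x > 0 <;> simp [pvLastPos, hxs, hx]
    | some j =>
      by_cases hx : x > 0 <;>
        simp [pvLastPos, hxs, hx, pv_insert_insert] <;> ring_nf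

-- minimum row length, as A's zip truncation and B's width both compute it
def pvNmin (ls : List (List Int)) (a : Nat) : Nat := ls.foldl (fun a r => min a r.length) a

def pvM : List (List Int) → Nat
  | [] => 0
  | h :: t => pvNmin t h.length

theorem pv_nmin_le_start (ls : List (List Int)) : ∀ a, pvNmin ls a ≤ a := by
  induction ls with
  | nil => intro a; simp [pvNmin]
  | cons x xs ih =>
    intro a
    exact le_trans (ih (min a x.length)) (min_le_left _ _)

theorem pv_nmin_le_mem (ls : List (List Int)) : ∀ a, ∀ x ∈ ls, pvNmin ls a ≤ x.length := by
  induction ls with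
  | nil => intro a x hx; simp at hx
  | cons y ys ih =>
    intro a x hx
    rcases List.mem_cons.1 hx with h | h
    · subst h
      exact le_trans (pv_nmin_le_start ys _) (min_le_right _ _)
    · exact ih _ x h

theorem pv_nmin_attained (ls : List (List Int)) :
    ∀ a, pvNmin ls a = a ∨ ∃ x ∈ ls, pvNmin ls a = x.length := by
  induction ls with
  | nil => intro a; left; simp [pvNmin]
  | cons y ys ih =>
    intro a
    have h' : pvNmin (y :: ys) a = pvNmin ys (min a y.length) := by simp [pvNmin]
    rcases ih (min a y.length) with h | ⟨x, hx, hval⟩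
    · by_cases hm : a ≤ y.length
      · left; rw [h', h]; omega
      · right; exact ⟨y, List.mem_cons_self, by rw [h', h]; omega⟩
    · right; exact ⟨x, List.mem_cons_of_mem _ hx, by rw [h', hval]⟩

theorem pv_nmin_cast (ls : List (List Int)) : ∀ a : Nat,
    ls.foldl (fun a r => min a (r.length : Int)) (a : Int) = (pvNmin ls a : Int) := by
  induction ls with
  | nil => intro a; simp [pvNmin]
  | cons y ys ih =>
    intro a
    have : min (a : Int) (y.length : Int) = ((min a y.length : Nat) : Int) := by
      simp [Nat.cast_min]
    simp only [pvNmin, List.foldl_cons, this]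
    exact ih _

theorem pv_nmin_map_tail (ls : List (List Int)) : ∀ a,
    pvNmin (ls.map (·.tail)) (a - 1) = pvNmin ls a - 1 := by
  induction ls with
  | nil => intro a; simp [pvNmin]
  | cons y ys ih =>
    intro a
    simp only [pvNmin, List.map_cons, List.foldl_cons, List.length_tail] at *
    rw [Nat.sub_min_sub_right]
    exact ih _

theorem pv_nmin_pos (ls : List (List Int)) : ∀ a, 1 ≤ a → (∀ r ∈ ls, r ≠ []) → 1 ≤ pvNmin ls a := by
  induction ls with
  | nil => intro a ha _; simpa [pvNmin] using ha
  | cons y ys ih =>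
    intro a ha hne
    have hy : y ≠ [] := hne y List.mem_cons_self
    have hy1 : 1 ≤ y.length := List.length_pos_iff.2 hy
    simp only [pvNmin, List.foldl_cons]
    exact ih (min a y.length) (le_min ha hy1) (fun r hr => hne r (List.mem_cons_of_mem _ hr))

theorem pv_zipCols_eq : ∀ (l : List Int) (rest : List (List Int)),
    pvZipCols l rest =
      (List.range (pvNmin rest l.length)).map
        (fun k => l.getD k 0 :: rest.map (fun r => r.getD k 0)) := by
  intro l
  induction l with
  | nil =>
    intro rest
    have h0 : pvNmin rest 0 = 0 := Nat.le_zero.1 (by simpa using pv_nmin_le_start rest 0)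
    simp [pvZipCols, h0]
  | cons x xs ih =>
    intro rest
    by_cases h : rest.any (·.isEmpty) = true
    · rcases List.any_eq_true.1 h with ⟨r, hr, hre⟩
      have hre' : r = [] := by simpa using hre
      have h0 : pvNmin rest (xs.length + 1) = 0 := by
        have h1 := pv_nmin_le_mem rest (xs.length + 1) r hr
        rw [hre'] at h1
        simpa using h1
      simp [pvZipCols, h, h0]
    · have hne : ∀ r ∈ rest, r ≠ [] := by
        intro r hr hre
        exact h (List.any_eq_true.2 ⟨r, hr, by simp [hre]⟩)
      have hpos : 1 ≤ pvNmin rest (x :: xs).length := pv_nmin_pos rest _ (by simp) hne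
      have htail : pvNmin (rest.map (·.tail)) xs.length = pvNmin rest (x :: xs).length - 1 := by
        have := pv_nmin_map_tail rest (x :: xs).length
        simpa using this
      have hm : pvNmin rest (x :: xs).length = (pvNmin rest (x :: xs).length - 1) + 1 := by omega
      rw [pvZipCols, if_neg (by simp [h]), ih, htail, hm, List.range_succ_eq_map]
      simp only [List.map_cons, List.map_map]
      congr 1
      · congr 1
        refine List.map_congr_left (fun r _ => ?_)
        cases r <;> simp
      · refine List.map_congr_left (fun k _ => ?_)
        simp only [Function.comp_apply]
        congr 1
        refine List.map_congr_left (fun r hr => ?_)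
        cases hr' : r with
        | nil => exact absurd hr' (hne r hr)
        | cons a t => simp

theorem pv_zipStar_eq (ls : List (List Int)) :
    pvZipStar ls = (List.range (pvM ls)).map (fun k => ls.map (fun r => r.getD k 0)) := by
  cases ls with
  | nil => simp [pvZipStar, pvM]
  | cons l rest => simp [pvZipStar, pvM, pv_zipCols_eq]

theorem pv_M_le_mem (ls : List (List Int)) (x : List Int) (hx : x ∈ ls) : pvM ls ≤ x.length := by
  cases ls with
  | nil => simp at hx
  | cons h t =>
    rcases List.mem_cons.1 hx with he | he
    · subst he; exact pv_nmin_le_start t _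
    · exact pv_nmin_le_mem t _ x he

theorem pv_M_attained (ls : List (List Int)) (h : ls ≠ []) : ∃ x ∈ ls, pvM ls = x.length := by
  cases ls with
  | nil => exact absurd rfl h
  | cons y t =>
    rcases pv_nmin_attained t y.length with he | ⟨x, hx, hval⟩
    · exact ⟨y, List.mem_cons_self, he⟩
    · exact ⟨x, List.mem_cons_of_mem _ hx, hval⟩

theorem pv_M_reverse (ls : List (List Int)) : pvM ls.reverse = pvM ls := by
  cases hls : ls with
  | nil => rfl
  | cons y t =>
    have h1 : ls ≠ [] := by simp [hls]
    have h2 : ls.reverse ≠ [] := by simp [h1]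
    rw [← hls]
    obtain ⟨x, hx, hvx⟩ := pv_M_attained ls.reverse h2
    obtain ⟨z, hz, hvz⟩ := pv_M_attained ls h1
    have hle1 : pvM ls.reverse ≤ z.length := pv_M_le_mem _ z (List.mem_reverse.2 hz)
    have hle2 : pvM ls ≤ x.length := pv_M_le_mem _ x (List.mem_reverse.1 hx)
    omega

-- first index (Int, counting from s) holding a positive cell: B's top_row entry
def pvFirstPos : List Int → Int → Option Int
  | [], _ => none
  | x :: xs, r => if x > 0 then some r else pvFirstPos xs (r + 1)

-- first index (Nat, from 0) holding a positive cell
def pvFirstNat : List Int → Option Nat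
  | [] => none
  | x :: xs => if x > 0 then some 0 else (pvFirstNat xs).map (· + 1)

theorem pv_firstPos_eq (l : List Int) : ∀ s : Int,
    pvFirstPos l s = (pvFirstNat l).map (fun r => s + (r : Int)) := by
  induction l with
  | nil => intro s; simp [pvFirstPos, pvFirstNat]
  | cons x xs ih =>
    intro s
    by_cases hx : x > 0
    · simp [pvFirstPos, pvFirstNat, hx]
    · simp only [pvFirstPos, pvFirstNat, if_neg hx, ih (s + 1)]
      cases pvFirstNat xs
      · simp
      · simp; ring

theorem pv_firstNat_lt (l : List Int) : ∀ r, pvFirstNat l = some r → r < l.length := by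
  induction l with
  | nil => intro r h; simp [pvFirstNat] at h
  | cons x xs ih =>
    intro r h
    by_cases hx : x > 0
    · simp [pvFirstNat, hx] at h
      simp only [List.length_cons]
      omega
    · simp only [pvFirstNat, if_neg hx] at h
      cases he : pvFirstNat xs with
      | none => simp [he] at h
      | some j =>
        simp [he] at h
        have := ih j he
        simp; omega

theorem pv_lastPos_append (l : List Int) (x : Int) :
    pvLastPos (l ++ [x]) = if x > 0 then some l.length else pvLastPos l := by
  induction l with
  | nil => by_cases hx : x > 0 <;> simp [pvLastPos, hx]
  | cons y ys ih =>
    by_cases hx : x > 0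
    · simp only [List.cons_append, pvLastPos, ih, if_pos hx]
      simp
    · simp only [List.cons_append, pvLastPos, ih, if_neg hx]

theorem pv_lastPos_reverse (l : List Int) :
    pvLastPos l.reverse = (pvFirstNat l).map (fun r => l.length - 1 - r) := by
  induction l with
  | nil => simp [pvLastPos, pvFirstNat]
  | cons x xs ih =>
    rw [List.reverse_cons, pv_lastPos_append]
    by_cases hx : x > 0
    · simp [pvFirstNat, hx]
    · rw [if_neg hx, ih]
      simp only [pvFirstNat, if_neg hx, Option.map_map]
      cases he : pvFirstNat xs with
      | none => simp
      | some j =>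
        have := pv_firstNat_lt xs j he
        simp [Function.comp_def]
        omega

theorem pv_enum_map_range (m : Nat) (f : Nat → List Int) :
    PySem.List.enumerate ((List.range m).map f) 0 =
      (List.range m).map (fun (k : Nat) => (Int.ofNat k, f k)) := by
  apply List.ext_getElem
  · simp [PySem.List.length_enumerate]
  · intro i h1 h2
    simp [PySem.List.getElem_enumerate, List.getElem_map, List.getElem_range]

-- zipWith against a row, seen pointwise on the range
theorem pv_zipWith_range_map {α β : Type} (h : α → Int → β) (w : Nat) (f : Nat → α)
    (row : List Int) (hw : w ≤ row.length) :
    List.zipWith h ((List.range w).map f) row =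
      (List.range w).map (fun c => h (f c) (row.getD c 0)) := by
  apply List.ext_getElem
  · simp [hw]
  · intro i h1 h2
    have hi : i < w := by simpa using h2
    have hir : i < row.length := lt_of_lt_of_le hi hw
    simp [List.getElem_zipWith, List.getD_eq_getElem?_getD, List.getElem?_eq_getElem hir]

-- B's streaming pass: running sum and first-filled-row, column by column
theorem pv_fold_inv (ls : List (List Int)) (w : Nat) (hw : ∀ r ∈ ls, w ≤ r.length) :
    ∀ (s : Int) (f : Nat → Int) (g : Nat → Option Int),
    (PySem.List.enumerate ls s).foldl
      (fun (st : List Int × List (Option Int)) p =>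
        (List.zipWith (fun s v => s + v) st.1 p.2,
         List.zipWith (fun t (v : Int) =>
            match t with
            | some _ => t
            | none => if v > 0 then some p.1 else none) st.2 p.2))
      ((List.range w).map f, (List.range w).map g)
    = ((List.range w).map (fun c => f c + (ls.map (fun r => r.getD c 0)).sum),
       (List.range w).map (fun c =>
          match g c with
          | some t => some t
          | none => pvFirstPos (ls.map (fun r => r.getD c 0)) s)) := by
  induction ls with
  | nil =>
    intro s f g
    simp only [PySem.List.enumerate_nil, List.foldl_nil, List.map_nil, List.sum_nil, pvFirstPos,
      Prod.mk.injEq]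
    refine ⟨?_, ?_⟩
    · exact (List.map_congr_left (fun c _ => by omega)).symm
    · refine (List.map_congr_left (fun c _ => ?_)).symm
      cases g c <;> rfl
  | cons row ls' ih =>
    intro s f g
    have hrow : w ≤ row.length := hw row List.mem_cons_self
    have hw' : ∀ r ∈ ls', w ≤ r.length := fun r hr => hw r (List.mem_cons_of_mem _ hr)
    rw [PySem.List.enumerate_cons, List.foldl_cons]
    dsimp only
    rw [pv_zipWith_range_map _ w f row hrow, pv_zipWith_range_map _ w g row hrow,
      ih hw' (s + 1)]
    simp only [Prod.mk.injEq]
    refine ⟨?_, ?_⟩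
    · refine List.map_congr_left (fun c _ => ?_)
      simp only [List.map_cons, List.sum_cons]
      ring
    · refine List.map_congr_left (fun c _ => ?_)
      simp only [List.map_cons]
      cases g c with
      | some t => rfl
      | none =>
        simp only [pvFirstPos]
        split_ifs <;> rfl

theorem pv_main (dead_table : List (List Int)) (rows columns : Int) :
    get_height_of_columns dead_table rows columns =
      get_height_of_columns_alt dead_table rows columns := by
  unfold get_height_of_columns get_height_of_columns_alt
  dsimp only
  have hwidth : (match dead_table with
      | [] => (0 : Int)
      | r0 :: rest => rest.foldl (fun a r => min a (r.length : Int)) (r0.length : Int)) =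
      ((pvM dead_table : Nat) : Int) := by
    cases dead_table with
    | nil => simp [pvM]
    | cons r0 rest => simpa [pvM, pvNmin] using pv_nmin_cast rest r0.length
  rw [hwidth]
  have htoNat : ((pvM dead_table : Nat) : Int).toNat = pvM dead_table := by simp
  rw [htoNat]
  have hrep0 : List.replicate (pvM dead_table) (0 : Int) =
      (List.range (pvM dead_table)).map (fun _ => (0 : Int)) := by
    simp [List.map_const']
  have hrepn : List.replicate (pvM dead_table) (none : Option Int) =
      (List.range (pvM dead_table)).map (fun _ => (none : Option Int)) := by
    simp [List.map_const']
  rw [hrep0, hrepn,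
    pv_fold_inv dead_table (pvM dead_table) (fun r hr => pv_M_le_mem dead_table r hr) 0
      (fun _ => 0) (fun _ => none),
    pv_zipStar_eq, pv_M_reverse, pv_enum_map_range, List.foldl_map,
    PySem.List.pyRange_zero_natCast, List.foldl_map]
  congr 1
  apply PySem.List.foldl_congr_mem
  intro d k hk
  have hkw : k < pvM dead_table := List.mem_range.1 hk
  dsimp only
  have hgetS : (PySem.List.pyGet?
      ((List.range (pvM dead_table)).map
        (fun c => 0 + (dead_table.map (fun r => r.getD c 0)).sum)) (k : Int)).getD 0 =
      (dead_table.map (fun r => r.getD k 0)).sum := by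
    simp [hkw]
  have hgetT : (PySem.List.pyGet?
      ((List.range (pvM dead_table)).map
        (fun c => pvFirstPos (dead_table.map (fun r => r.getD c 0)) 0)) (k : Int)).getD none =
      pvFirstPos (dead_table.map (fun r => r.getD k 0)) 0 := by
    simp [hkw]
  rw [hgetS, hgetT]
  have hrev : dead_table.reverse.map (fun r => r.getD k 0) =
      (dead_table.map (fun r => r.getD k 0)).reverse := by
    rw [List.map_reverse]
  rw [Int.ofNat_eq_natCast, hrev, List.sum_reverse]
  split_ifs with hs
  · rfl
  · rw [pv_inner_fold, pv_lastPos_reverse, pv_firstPos_eq]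
    cases he : pvFirstNat (dead_table.map (fun r => r.getD k 0)) with
    | none => simp
    | some r =>
      have hlt := pv_firstNat_lt _ r he
      simp only [Option.map_some]
      congr 1
      simp only [List.length_map] at hlt ⊢
      omega

-- ===== VERDICT (by name: the statement is the Claim_ definition above) =====
theorem get_height_of_columns_spec : Claim_equal_get_height_of_columns := by
  intro dead_table rows columns _
  unfold Spec_get_height_of_columns
  exact pv_main dead_table rows columns
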